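-- pv_equiv track=rewrite | github.com/Matrixbravo/ai-incident-intelligence-platform | apps/ml-worker/cluster.py | cluster_fallback
-- ===== SOURCE A (Python) =====
-- from collections import Counter, defaultdict
--
-- def categorize(text: str):
--     t = text.lower()
--     if "timeout" in t or "sql" in t or "connection pool" in t:
--         return ("Dependency/DB Timeout", 0.78)
--     if "unauthorized" in t or "jwt" in t or "token" in t:
--         return ("Auth/Token", 0.66)
--     if "throttle" in t or "rate limit" in t or "429" in t or "quota" in t:
--         return ("Throttling/Quota", 0.70)
--     if "outofmemory" in t or "oom" in t or "killed" in t: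
--         return ("Resource Exhaustion", 0.75)
--     return ("Unknown", 0.50)
--
-- def cluster_fallback(messages):
--     """
--     Pure-Python fallback clustering:
--     group by category first, then split into signature buckets.
--     This is not “ML”, but keeps your demo working even if sklearn breaks.
--     """
--     buckets = defaultdict(list)
--     for i, msg in enumerate(messages):
--         cat, _ = categorize(msg)
--         key = (cat, " ".join(msg.lower().split()[:3]))  # cheap signature bucket
--         buckets[key].append(i)
--
--     labels = [-1] * len(messages)
--     current = 0
--     for _, idxs in buckets.items():
--         if len(idxs) < 2:
--             continue
--         for i in idxs:
--             labels[i] = current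
--         current += 1
--     return labels
-- ===== SOURCE B (Python) =====
-- from collections import Counter
--
--
-- def categorize(text: str):
--     t = text.lower()
--     if "timeout" in t or "sql" in t or "connection pool" in t:
--         return ("Dependency/DB Timeout", 0.78)
--     if "unauthorized" in t or "jwt" in t or "token" in t:
--         return ("Auth/Token", 0.66)
--     if "throttle" in t or "rate limit" in t or "429" in t or "quota" in t:
--         return ("Throttling/Quota", 0.70)
--     if "outofmemory" in t or "oom" in t or "killed" in t:
--         return ("Resource Exhaustion", 0.75)
--     return ("Unknown", 0.50)
--
--
-- def _key(msg):
--     return (categorize(msg)[0], " ".join(msg.lower().split()[:3]))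
--
--
-- def cluster_fallback(messages):
--     """Counter + single labelling pass: no index buckets are ever built.
--
--     A key's label is its rank among first appearances of keys that occur
--     at least twice; singleton keys stay -1.
--     """
--     keys = [_key(m) for m in messages]
--     counts = Counter(keys)
--     labels = []
--     label_map = {}
--     for k in keys:
--         if counts[k] >= 2:
--             lbl = label_map.get(k)
--             if lbl is None:
--                 lbl = len(label_map)
--                 label_map[k] = lbl
--             labels.append(lbl)
--         else:
--             labels.append(-1)
--     return labels
-- ===== Notes on version B (the rewrite author's own statement) =====
-- stated objective: alternative
-- what changed: Instead of building a dict of per-key index buckets and then writing labels into a preallocated array bucket by bucket, B counts keys with a Counter and assigns labels in one forward pass over the messages via a first-appearance label map, never materialising any index lists.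
import Mathlib
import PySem

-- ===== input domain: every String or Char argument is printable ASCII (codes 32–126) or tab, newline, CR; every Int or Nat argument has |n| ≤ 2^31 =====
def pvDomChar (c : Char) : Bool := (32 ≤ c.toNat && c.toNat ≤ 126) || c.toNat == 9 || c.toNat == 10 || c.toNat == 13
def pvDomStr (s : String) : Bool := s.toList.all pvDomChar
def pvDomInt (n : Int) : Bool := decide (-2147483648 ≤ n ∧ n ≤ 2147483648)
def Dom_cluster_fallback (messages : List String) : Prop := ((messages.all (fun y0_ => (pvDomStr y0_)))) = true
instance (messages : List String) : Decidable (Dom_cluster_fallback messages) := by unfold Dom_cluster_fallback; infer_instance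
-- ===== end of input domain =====

-- B replaces A's dict of per-key index buckets (plus a write-into-array pass) by a
-- counts pass and a single forward labelling pass with a first-appearance label map
-- (alternative decomposition, same asymptotic cost); return values agree on all inputs.

-- ===== PORT A =====
-- categorize returns (category, confidence-float); cluster_fallback uses only the
-- category, so the port returns the category string alone (the float is discarded).
def pvCategorize (text : String) : String :=
  let t := PySem.Str.lower text
  if PySem.Str.isIn "timeout" t || PySem.Str.isIn "sql" t || PySem.Str.isIn "connection pool" t then
    "Dependency/DB Timeout"
  else if PySem.Str.isIn "unauthorized" t || PySem.Str.isIn "jwt" t || PySem.Str.isIn "token" t then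
    "Auth/Token"
  else if PySem.Str.isIn "throttle" t || PySem.Str.isIn "rate limit" t || PySem.Str.isIn "429" t || PySem.Str.isIn "quota" t then
    "Throttling/Quota"
  else if PySem.Str.isIn "outofmemory" t || PySem.Str.isIn "oom" t || PySem.Str.isIn "killed" t then
    "Resource Exhaustion"
  else "Unknown"

-- " ".join(msg.lower().split()[:3])
def pvSig (msg : String) : String :=
  PySem.Str.join " " ((PySem.Str.split₀ (PySem.Str.lower msg)).take 3)

def cluster_fallback (messages : List String) : List Int :=
  -- buckets = defaultdict(list); for i, msg in enumerate(messages): buckets[(cat, sig)].append(i)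
  let buckets : PySem.Dict (String × String) (List Int) :=
    (PySem.List.enumerate messages).foldl
      (fun d p =>
        let cat := pvCategorize p.2
        let key := (cat, pvSig p.2)
        d.modify key [] (fun l => l ++ [p.1]))
      (PySem.Dict.mk [])
  -- labels = [-1] * len(messages); current = 0; for _, idxs in buckets.items(): …
  let labels0 : List Int := List.replicate messages.length (-1)
  let fin := buckets.items.foldl
      (fun (st : List Int × Int) kv =>
        if kv.2.length < 2 then st
        else (kv.2.foldl (fun ls i => ls.set i.toNat st.2) st.1, st.2 + 1))
      -- labels[i] = current; every i comes from enumerate, hence 0 ≤ i and .toNat is exact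
      (labels0, 0)
  fin.1

-- ===== PORT B =====
def pvKey (msg : String) : String × String := (pvCategorize msg, pvSig msg)

def cluster_fallback_alt (messages : List String) : List Int :=
  let keys := messages.map pvKey
  -- counts = Counter(keys)
  let counts : PySem.Dict (String × String) Int :=
    keys.foldl (fun d k => d.modify k 0 (fun c => c + 1)) (PySem.Dict.mk [])
  let fin := keys.foldl
      (fun (st : List Int × PySem.Dict (String × String) Int) k =>
        if 2 ≤ counts.getD k 0 then
          match st.2.get? k with
          | some v => (st.1 ++ [v], st.2)
          | none => (st.1 ++ [(st.2.items.length : Int)], st.2.insert k (st.2.items.length : Int))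
        else (st.1 ++ [(-1 : Int)], st.2))
      ([], PySem.Dict.mk [])
  fin.1

-- ===== PRECONDITION & SPEC =====
def Spec_cluster_fallback (messages : List String) (out : List Int) : Prop := out = cluster_fallback_alt messages
instance (messages : List String) (out : List Int) : Decidable (Spec_cluster_fallback messages out) := by unfold Spec_cluster_fallback; infer_instance

-- ===== CLAIM (what is proved, stated in full; the proofs are below) =====
def Claim_equal_cluster_fallback : Prop := ∀ (messages : List String), Dom_cluster_fallback messages → Spec_cluster_fallback messages (cluster_fallback messages)

-- ===== LEMMAS AND PROOFS =====

-- the distinct keys occurring at least twice, in first-appearance order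
def pvKept (keys : List (String × String)) : List (String × String) :=
  (PySem.List.dedup keys).filter (fun k => decide (2 ≤ keys.count k))

-- the label both programs give a key
def pvLabel (keys : List (String × String)) (k : String × String) : Int :=
  if 2 ≤ keys.count k then ((pvKept keys).idxOf k : Int) else -1

-- the index bucket of a key, over a list of (index, key) pairs
def pvGrp {α : Type} [BEq α] (ps : List (Int × α)) (k : α) : List Int :=
  (ps.filter (fun p => p.2 == k)).map Prod.fst

-- the (index, key) pairs of A's first loop
def pvQs (messages : List String) : List (Int × (String × String)) :=
  (PySem.List.enumerate messages).map (fun p => (p.1, pvKey p.2))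

lemma pv_dedup_append_singleton {α : Type} [BEq α] [LawfulBEq α] (l : List α) (x : α) :
    PySem.List.dedup (l ++ [x]) =
      if x ∈ l then PySem.List.dedup l else PySem.List.dedup l ++ [x] := by
  unfold PySem.List.dedup PySem.Set.ofList
  rw [List.foldl_append]
  simp only [List.foldl_cons, List.foldl_nil, PySem.Set.add]
  have : (List.foldl PySem.Set.add PySem.Set.empty l).contains x = (x ∈ l : Bool) := by
    have h1 : x ∈ List.foldl PySem.Set.add PySem.Set.empty l ↔ x ∈ l := PySem.Set.mem_ofList l x
    simp only [PySem.Set.empty] at h1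
    by_cases hx : x ∈ l <;> simp [List.contains_iff_mem, PySem.Set.empty, h1, hx]
  rw [this]
  by_cases hx : x ∈ l <;> simp [hx]

lemma pv_find?_mapped {α β : Type} [BEq α] [LawfulBEq α] (L : List α) (g : α → β) (k : α) :
    List.find? (fun p => p.1 == k) (L.map (fun x => (x, g x)))
      = if k ∈ L then some (k, g k) else none := by
  induction L with
  | nil => simp
  | cons x L ih =>
    simp only [List.map_cons, List.find?_cons]
    by_cases hx : x = k
    · subst hx; simp
    · have hxk : (x == k) = false := by simp [hx]
      have hmem : (k ∈ x :: L) ↔ (k ∈ L) := by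
        constructor
        · intro h
          rcases List.mem_cons.mp h with h | h
          · exact absurd h.symm hx
          · exact h
        · exact List.mem_cons_of_mem x
      simp [hxk, ih, hmem]

lemma pv_enumerate_eq_zipIdx (l : List String) :
    ∀ (i0 : Nat), PySem.List.enumerate l (i0 : Int)
      = (l.zipIdx i0).map (fun p => ((p.2 : Int), p.1)) := by
  induction l with
  | nil => intro i0; rfl
  | cons x l ih =>
    intro i0
    have h := ih (i0 + 1)
    push_cast at h
    simp [PySem.List.enumerate, List.zipIdx_cons, h]

lemma pv_setMany_len (g : List Int) (c : Int) :
    ∀ (ls : List Int), (g.foldl (fun l i => l.set i.toNat c) ls).length = ls.length := by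
  induction g with
  | nil => intro ls; rfl
  | cons i g ih => intro ls; simp [ih]

lemma pv_setMany_get (g : List Int) (c : Int) (hg : ∀ i ∈ g, 0 ≤ i) (j : Nat) :
    ∀ (ls : List Int),
      (g.foldl (fun l i => l.set i.toNat c) ls)[j]?
        = if (j : Int) ∈ g ∧ j < ls.length then some c else ls[j]? := by
  induction g with
  | nil => intro ls; simp
  | cons i g ih =>
    intro ls
    have hi : 0 ≤ i := hg i (List.mem_cons_self ..)
    have hrest : ∀ x ∈ g, 0 ≤ x := fun x hx => hg x (List.mem_cons_of_mem _ hx)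
    simp only [List.foldl_cons]
    rw [ih hrest (ls.set i.toNat c)]
    simp only [List.length_set, List.getElem?_set, List.mem_cons]
    by_cases hlen : j < ls.length
    · by_cases h1 : (j:Int) ∈ g
      · simp [h1, hlen]
      · by_cases h2 : (j:Int) = i
        · have ht : i.toNat = j := by omega
          simp [h1, h2, ht, hlen]
        · have ht : ¬ i.toNat = j := by omega
          simp [h1, h2, ht]
    · have h0 : ls[j]? = none := List.getElem?_eq_none (by omega)
      have e1 : ¬ ((j:Int) ∈ g ∧ j < ls.length) := fun h => hlen h.2
      have e2 : ¬ (((j:Int) = i ∨ (j:Int) ∈ g) ∧ j < ls.length) := fun h => hlen h.2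
      simp only [e1, e2, if_false]
      by_cases ht : i.toNat = j
      · simp [ht, h0, hlen]
      · simp [ht]

lemma pv_map_fst_zipIdx {α : Type} (l : List α) : ∀ (n : Nat), (l.zipIdx n).map Prod.fst = l := by
  induction l with
  | nil => intro n; rfl
  | cons x l ih => intro n; simp [List.zipIdx_cons, ih]

lemma pv_qs_eq (messages : List String) :
    pvQs messages = (messages.zipIdx).map (fun p => ((p.2 : Int), pvKey p.1)) := by
  unfold pvQs
  rw [show ((0:Int) = ((0:Nat):Int)) from rfl, pv_enumerate_eq_zipIdx messages 0]
  simp [List.map_map, Function.comp]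

lemma pv_qs_map_snd (messages : List String) :
    (pvQs messages).map Prod.snd = messages.map pvKey := by
  rw [pv_qs_eq, List.map_map,
    show (Prod.snd ∘ fun (p : String × Nat) => ((p.2 : Int), pvKey p.1)) = pvKey ∘ Prod.fst from rfl,
    ← List.map_map, pv_map_fst_zipIdx]

lemma pv_grp_len (messages : List String) (k : String × String) :
    (pvGrp (pvQs messages) k).length = (messages.map pvKey).count k := by
  unfold pvGrp
  rw [List.length_map, ← List.countP_eq_length_filter, ← pv_qs_map_snd,
    List.count_eq_countP, List.countP_map]
  rfl

lemma pv_mem_grp (messages : List String) (k : String × String) (j : Nat) :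
    ((j : Int) ∈ pvGrp (pvQs messages) k) ↔ ((messages.map pvKey)[j]? = some k) := by
  unfold pvGrp
  rw [pv_qs_eq, List.filter_map, List.map_map]
  simp only [List.mem_map, List.mem_filter, Function.comp]
  constructor
  · rintro ⟨p, ⟨hp, hk⟩, he⟩
    have hj : p.2 = j := by exact_mod_cast he
    have hg : messages[p.2]? = some p.1 := List.mem_zipIdx_iff_getElem?.mp hp
    rw [List.getElem?_map, ← hj, hg]
    simp only [beq_iff_eq] at hk
    simp [hk]
  · intro h
    rw [List.getElem?_map] at h
    obtain ⟨x, hx, hkx⟩ := Option.map_eq_some_iff.mp h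
    refine ⟨(x, j), ⟨List.mem_zipIdx_iff_getElem?.mpr (by simpa using hx), by simp [hkx]⟩, rfl⟩

lemma pv_grp_nonneg (messages : List String) (k : String × String) :
    ∀ i ∈ pvGrp (pvQs messages) k, 0 ≤ i := by
  unfold pvGrp
  rw [pv_qs_eq, List.filter_map, List.map_map]
  rintro i hi
  simp only [List.mem_map, Function.comp] at hi
  obtain ⟨p, hp, rfl⟩ := hi
  simp

lemma pv_counts_getD (keys : List (String × String)) (k : String × String) :
    (keys.foldl (fun d k => d.modify k 0 (fun c => c + 1)) (PySem.Dict.mk [])).getD k 0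
      = (keys.count k : Int) := by
  rw [PySem.Dict.getD_foldl_modify_add_one]
  simp [PySem.Dict.getD, PySem.Dict.get?]

lemma pv_dedup_filter_prefix {α : Type} [BEq α] [LawfulBEq α] (p : α → Bool) (l t : List α) :
    (PySem.List.dedup l).filter p <+: (PySem.List.dedup (l ++ t)).filter p := by
  induction t using List.reverseRecOn with
  | nil => simp
  | append_singleton t x ih =>
    rw [← List.append_assoc, pv_dedup_append_singleton]
    split_ifs with h
    · exact ih
    · rw [List.filter_append]
      exact ih.trans (List.prefix_append _ _)

lemma pv_grp_append_singleton {α : Type} [BEq α] [LawfulBEq α] (ps : List (Int × α)) (p : Int × α) (k : α) :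
    pvGrp (ps ++ [p]) k = if p.2 == k then pvGrp ps k ++ [p.1] else pvGrp ps k := by
  unfold pvGrp
  rw [List.filter_append]
  by_cases h : p.2 = k
  · simp [h]
  · have hb : (p.2 == k) = false := by simp [h]
    simp [hb]

lemma pv_grp_nil_of_not_mem {α : Type} [BEq α] [LawfulBEq α] (ps : List (Int × α)) (k : α)
    (h : k ∉ ps.map Prod.snd) : pvGrp ps k = [] := by
  unfold pvGrp
  rw [List.filter_eq_nil_iff.mpr, List.map_nil]
  intro q hq
  simp only [beq_iff_eq]
  intro hk
  exact h (List.mem_map.mpr ⟨q, hq, hk⟩)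

lemma pv_dict_fold_items {α : Type} [BEq α] [LawfulBEq α] (ps : List (Int × α)) :
    (ps.foldl (fun d p => d.modify p.2 [] (fun l => l ++ [p.1])) (PySem.Dict.mk [])).items
      = (PySem.List.dedup (ps.map Prod.snd)).map (fun k => (k, pvGrp ps k)) := by
  induction ps using List.reverseRecOn with
  | nil => simp [PySem.List.dedup, PySem.Set.ofList, PySem.Set.empty]
  | append_singleton ps p ih =>
    rw [List.foldl_append, List.foldl_cons, List.foldl_nil]
    have hcontains :
        ((ps.foldl (fun d p => d.modify p.2 [] (fun l => l ++ [p.1])) (PySem.Dict.mk [])).contains p.2)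
          = decide (p.2 ∈ ps.map Prod.snd) := by
      rw [PySem.Dict.contains, ih]
      by_cases h : p.2 ∈ ps.map Prod.snd
      · have h' : p.2 ∈ PySem.List.dedup (ps.map Prod.snd) := by
          rw [PySem.List.dedup]; exact (PySem.Set.mem_ofList _ _).mpr h
        simp only [h, decide_true]
        rw [List.any_eq_true]
        exact ⟨(p.2, pvGrp ps p.2), List.mem_map.mpr ⟨p.2, h', rfl⟩, by simp⟩
      · have h' : p.2 ∉ PySem.List.dedup (ps.map Prod.snd) := by
          rw [PySem.List.dedup]; exact fun hc => h ((PySem.Set.mem_ofList _ _).mp hc)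
        simp only [h, decide_false]
        rw [List.any_eq_false]
        rintro ⟨k, v⟩ hkv
        obtain ⟨k', hk', heq⟩ := List.mem_map.mp hkv
        cases heq
        simp only [beq_iff_eq]
        exact fun hc => h' (hc ▸ hk')
    have hfind := pv_find?_mapped (PySem.List.dedup (ps.map Prod.snd)) (pvGrp ps) p.2
    rw [PySem.Dict.modify, PySem.Dict.insert, hcontains]
    by_cases hmem : p.2 ∈ ps.map Prod.snd
    · have hded : p.2 ∈ PySem.List.dedup (ps.map Prod.snd) := by
        rw [PySem.List.dedup]; exact (PySem.Set.mem_ofList _ _).mpr hmem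
      rw [if_pos (by simp [hmem])]
      have hgetD :
          ((ps.foldl (fun d p => d.modify p.2 [] (fun l => l ++ [p.1])) (PySem.Dict.mk [])).getD p.2 [])
            = pvGrp ps p.2 := by
        rw [PySem.Dict.getD, PySem.Dict.get?, ih, hfind]
        have hded' : p.2 ∈ PySem.Set.ofList (ps.map Prod.snd) := hded
        simp [hded']
      rw [hgetD, ih]
      rw [List.map_map]
      have hded2 : PySem.List.dedup (ps.map Prod.snd ++ [p.2]) = PySem.List.dedup (ps.map Prod.snd) := by
        rw [pv_dedup_append_singleton, if_pos hmem]
      rw [List.map_append, List.map_cons, List.map_nil, hded2]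
      apply List.map_congr_left
      intro k hk
      simp only [Function.comp]
      by_cases hkp : k = p.2
      · subst hkp
        simp [pv_grp_append_singleton]
      · have h1 : (k == p.2) = false := by simp [hkp]
        have h2 : (p.2 == k) = false := beq_eq_false_iff_ne.mpr (fun h => hkp h.symm)
        simp [h1, h2, pv_grp_append_singleton]
    · have hded : p.2 ∉ PySem.List.dedup (ps.map Prod.snd) := by
        rw [PySem.List.dedup]; exact fun hc => hmem ((PySem.Set.mem_ofList _ _).mp hc)
      rw [if_neg (by simp [hmem])]
      simp only
      rw [ih]
      have hded2 : PySem.List.dedup (ps.map Prod.snd ++ [p.2])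
          = PySem.List.dedup (ps.map Prod.snd) ++ [p.2] := by
        rw [pv_dedup_append_singleton, if_neg hmem]
      rw [List.map_append, List.map_cons, List.map_nil, hded2, List.map_append]
      congr 1
      · apply List.map_congr_left
        intro k hk
        have hkp : (p.2 == k) = false := beq_eq_false_iff_ne.mpr (fun h => hded (h ▸ hk))
        rw [pv_grp_append_singleton, hkp, if_neg (by simp)]
      · simp only [List.map_cons, List.map_nil]
        rw [pv_grp_append_singleton, beq_self_eq_true, if_pos rfl, pv_grp_nil_of_not_mem ps p.2 hmem]
        have : ((ps.foldl (fun d p => d.modify p.2 [] (fun l => l ++ [p.1])) (PySem.Dict.mk [])).getD p.2 [])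
            = [] := by
          rw [PySem.Dict.getD, PySem.Dict.get?, ih, hfind]
          have hded' : p.2 ∉ PySem.Set.ofList (ps.map Prod.snd) := hded
          simp [hded']
        rw [this]

lemma pv_skip_filter {σ α : Type} (pc : α → Prop) [DecidablePred pc] (f : σ → α → σ) :
    ∀ (l : List α) (st : σ),
      l.foldl (fun st x => if pc x then st else f st x) st
        = (l.filter (fun x => !decide (pc x))).foldl f st := by
  intro l
  induction l with
  | nil => intro st; rfl
  | cons x l ih =>
    intro st
    by_cases hx : pc x <;> simp [List.filter_cons, hx, ih]

lemma pv_write_len (messages : List String) :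
    ∀ (ks : List (String × String)) (ls : List Int) (c : Int),
      ((ks.foldl (fun st k =>
          ((pvGrp (pvQs messages) k).foldl (fun l i => l.set i.toNat st.2) st.1, st.2 + 1))
        (ls, c)).1).length = ls.length := by
  intro ks
  induction ks with
  | nil => intro ls c; rfl
  | cons k ks ih =>
    intro ls c
    simp only [List.foldl_cons]
    rw [ih, pv_setMany_len]

lemma pv_write_get (messages : List String) (j : Nat) (hj : j < (messages.map pvKey).length) :
    ∀ (ks : List (String × String)) (ls : List Int) (c : Int), ks.Nodup →
      ls.length = messages.length →
      ((ks.foldl (fun st k =>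
          ((pvGrp (pvQs messages) k).foldl (fun l i => l.set i.toNat st.2) st.1, st.2 + 1))
        (ls, c)).1)[j]?
        = if (messages.map pvKey)[j] ∈ ks
            then some (c + ((ks.idxOf (messages.map pvKey)[j] : Nat) : Int)) else ls[j]? := by
  intro ks
  induction ks with
  | nil => intro ls c _ _; simp
  | cons k ks ih =>
    intro ls c hnd hlen
    have hnd' := (List.nodup_cons.mp hnd).2
    have hknotin := (List.nodup_cons.mp hnd).1
    simp only [List.foldl_cons]
    rw [ih _ _ hnd' (by rw [pv_setMany_len]; exact hlen)]
    have hmem : ((j : Int) ∈ pvGrp (pvQs messages) k) ↔ ((messages.map pvKey)[j] = k) := by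
      rw [pv_mem_grp, List.getElem?_eq_getElem hj, Option.some_inj]
    have hlen2 : j < ls.length := by
      rw [hlen]; simpa using hj
    by_cases hk : (messages.map pvKey)[j] = k
    · have hnotin : (messages.map pvKey)[j] ∉ ks := by rw [hk]; exact hknotin
      rw [if_neg hnotin, pv_setMany_get _ _ (pv_grp_nonneg messages k) j,
        if_pos ⟨hmem.mpr hk, hlen2⟩, if_pos (by simp [hk])]
      rw [hk, List.idxOf_cons_self]
      simp
    · by_cases hks : (messages.map pvKey)[j] ∈ ks
      · rw [if_pos hks, if_pos (List.mem_cons_of_mem _ hks)]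
        rw [List.idxOf_cons_ne _ (by exact fun h => hk h.symm)]
        push_cast
        ring_nf
      · rw [if_neg hks, if_neg (fun h => (List.mem_cons.mp h).elim hk hks),
          pv_setMany_get _ _ (pv_grp_nonneg messages k) j,
          if_neg (by rw [hmem]; exact fun h => hk h.1)]

lemma pv_A_eq_ref (messages : List String) :
    cluster_fallback messages
      = (messages.map pvKey).map (pvLabel (messages.map pvKey)) := by
  unfold cluster_fallback
  dsimp only
  rw [show (fun (d : PySem.Dict (String × String) (List Int)) (p : Int × String) =>
        d.modify (pvCategorize p.2, pvSig p.2) [] (fun l => l ++ [p.1]))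
      = (fun (d : PySem.Dict (String × String) (List Int)) (p : Int × String) =>
        d.modify (pvKey p.2) [] (fun l => l ++ [p.1])) from rfl]
  rw [show (PySem.List.enumerate messages).foldl
        (fun (d : PySem.Dict (String × String) (List Int)) (p : Int × String) =>
          d.modify (pvKey p.2) [] (fun l => l ++ [p.1])) (PySem.Dict.mk [])
      = (pvQs messages).foldl
        (fun (d : PySem.Dict (String × String) (List Int)) (q : Int × (String × String)) =>
          d.modify q.2 [] (fun l => l ++ [q.1])) (PySem.Dict.mk [])
      from by unfold pvQs; rw [List.foldl_map]]
  rw [pv_dict_fold_items, pv_qs_map_snd]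
  rw [pv_skip_filter (fun kv : (String × String) × List Int => kv.2.length < 2)]
  rw [List.filter_map]
  have hfun : ((fun (kv : (String × String) × List Int) => !decide (kv.2.length < 2)) ∘
        (fun k => (k, pvGrp (pvQs messages) k)))
      = fun k => decide (2 ≤ (messages.map pvKey).count k) := by
    funext k
    simp only [Function.comp]
    rw [pv_grp_len]
    by_cases h : 2 ≤ (messages.map pvKey).count k
    · simp [h, Nat.not_lt.mpr h]
    · simp [h, Nat.lt_of_not_le h]
  rw [hfun]
  rw [List.foldl_map]
  dsimp only
  rw [show List.filter (fun k => decide (2 ≤ List.count k (List.map pvKey messages)))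
        (PySem.List.dedup (List.map pvKey messages)) = pvKept (messages.map pvKey) from rfl]
  apply List.ext_getElem?
  intro j
  by_cases hj : j < (messages.map pvKey).length
  · have hnd : (pvKept (messages.map pvKey)).Nodup := by
      apply List.Nodup.filter
      rw [PySem.List.dedup]
      exact PySem.Set.nodup_ofList _
    rw [pv_write_get messages j hj (pvKept (messages.map pvKey)) _ 0 hnd
      (by rw [List.length_replicate])]
    have hkj : (messages.map pvKey)[j] ∈ messages.map pvKey := List.getElem_mem hj
    have hmemkept : ((messages.map pvKey)[j] ∈ pvKept (messages.map pvKey))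
        ↔ 2 ≤ (messages.map pvKey).count (messages.map pvKey)[j] := by
      unfold pvKept
      rw [List.mem_filter]
      constructor
      · intro h; simpa using h.2
      · intro h
        refine ⟨?_, by simpa using h⟩
        rw [PySem.List.dedup]
        exact (PySem.Set.mem_ofList _ _).mpr hkj
    rw [List.getElem?_map, List.getElem?_eq_getElem hj, Option.map_some]
    unfold pvLabel
    by_cases hP : 2 ≤ (messages.map pvKey).count (messages.map pvKey)[j]
    · rw [if_pos (hmemkept.mpr hP), if_pos hP]
      simp
    · rw [if_neg (fun h => hP (hmemkept.mp h)), if_neg hP]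
      rw [List.getElem?_replicate]
      have : j < messages.length := by simpa using hj
      simp [this]
  · rw [List.getElem?_eq_none, List.getElem?_eq_none]
    · simpa using Nat.le_of_not_lt hj
    · rw [pv_write_len, List.length_replicate]
      simpa using Nat.le_of_not_lt hj

lemma pv_idxOf_append {α : Type} [BEq α] [LawfulBEq α] (k : α) (t : List α) :
    ∀ (L : List α), k ∉ L → (L ++ k :: t).idxOf k = L.length := by
  intro L
  induction L with
  | nil => intro _; simp
  | cons x L ih =>
    intro hk
    have hx : ¬ x = k := fun h => hk (h ▸ List.mem_cons_self ..)
    rw [List.cons_append, List.idxOf_cons_ne _ (by exact hx),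
      ih (fun h => hk (List.mem_cons_of_mem _ h)), List.length_cons]

lemma pv_mem_dedup {α : Type} [BEq α] [LawfulBEq α] (l : List α) (x : α) :
    x ∈ PySem.List.dedup l ↔ x ∈ l := by
  rw [PySem.List.dedup]
  exact PySem.Set.mem_ofList l x

lemma pv_B_loop (keys : List (String × String)) :
    ∀ (suf pre : List (String × String)), keys = pre ++ suf →
      suf.foldl
        (fun (st : List Int × PySem.Dict (String × String) Int) k =>
          if 2 ≤ keys.count k then
            match st.2.get? k with
            | some v => (st.1 ++ [v], st.2)
            | none => (st.1 ++ [(st.2.items.length : Int)], st.2.insert k (st.2.items.length : Int))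
          else (st.1 ++ [(-1 : Int)], st.2))
        (pre.map (pvLabel keys),
         PySem.Dict.mk (((PySem.List.dedup pre).filter (fun k => decide (2 ≤ keys.count k))).map
           (fun k => (k, ((pvKept keys).idxOf k : Int)))))
      = (keys.map (pvLabel keys),
         PySem.Dict.mk (((PySem.List.dedup keys).filter (fun k => decide (2 ≤ keys.count k))).map
           (fun k => (k, ((pvKept keys).idxOf k : Int))))) := by
  intro suf
  induction suf with
  | nil =>
    intro pre h
    rw [List.append_nil] at h
    subst h
    rfl
  | cons k suf ih =>
    intro pre h
    rw [List.foldl_cons]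
    have hget : (PySem.Dict.mk (((PySem.List.dedup pre).filter
          (fun k => decide (2 ≤ keys.count k))).map
            (fun k => (k, ((pvKept keys).idxOf k : Int)))) : PySem.Dict (String × String) Int).get? k
        = if k ∈ (PySem.List.dedup pre).filter (fun k => decide (2 ≤ keys.count k))
            then some ((pvKept keys).idxOf k : Int) else none := by
      rw [PySem.Dict.get?]
      simp only
      rw [pv_find?_mapped]
      by_cases hm : k ∈ (PySem.List.dedup pre).filter (fun k => decide (2 ≤ keys.count k))
      · simp [hm]
      · simp [hm]
    have hstep :
        (if 2 ≤ keys.count k then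
          match (PySem.Dict.mk (((PySem.List.dedup pre).filter
              (fun k => decide (2 ≤ keys.count k))).map
                (fun k => (k, ((pvKept keys).idxOf k : Int)))) : PySem.Dict (String × String) Int).get? k with
          | some v => (pre.map (pvLabel keys) ++ [v], (PySem.Dict.mk (((PySem.List.dedup pre).filter
              (fun k => decide (2 ≤ keys.count k))).map
                (fun k => (k, ((pvKept keys).idxOf k : Int)))) : PySem.Dict (String × String) Int))
          | none => (pre.map (pvLabel keys) ++ [((((PySem.List.dedup pre).filter
              (fun k => decide (2 ≤ keys.count k))).map
                (fun k => (k, ((pvKept keys).idxOf k : Int)))).length : Int)],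
              (PySem.Dict.mk (((PySem.List.dedup pre).filter
              (fun k => decide (2 ≤ keys.count k))).map
                (fun k => (k, ((pvKept keys).idxOf k : Int)))) : PySem.Dict (String × String) Int).insert k
                ((((PySem.List.dedup pre).filter (fun k => decide (2 ≤ keys.count k))).map
                  (fun k => (k, ((pvKept keys).idxOf k : Int)))).length : Int))
        else (pre.map (pvLabel keys) ++ [(-1 : Int)],
          (PySem.Dict.mk (((PySem.List.dedup pre).filter
              (fun k => decide (2 ≤ keys.count k))).map
                (fun k => (k, ((pvKept keys).idxOf k : Int)))) : PySem.Dict (String × String) Int)))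
        = ((pre ++ [k]).map (pvLabel keys),
           PySem.Dict.mk (((PySem.List.dedup (pre ++ [k])).filter (fun k => decide (2 ≤ keys.count k))).map
             (fun k => (k, ((pvKept keys).idxOf k : Int))))) := by
      by_cases hP : 2 ≤ keys.count k
      · rw [if_pos hP, hget]
        by_cases hpre : k ∈ pre
        · have hmem : k ∈ (PySem.List.dedup pre).filter (fun k => decide (2 ≤ keys.count k)) := by
            rw [List.mem_filter, pv_mem_dedup]
            exact ⟨hpre, by simpa using hP⟩
          rw [if_pos hmem]
          simp only
          rw [pv_dedup_append_singleton, if_pos hpre]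
          congr 1
          rw [List.map_append, List.map_cons, List.map_nil]
          congr 1
          unfold pvLabel
          rw [if_pos hP]
        · have hnmem : k ∉ (PySem.List.dedup pre).filter (fun k => decide (2 ≤ keys.count k)) := by
            rw [List.mem_filter, pv_mem_dedup]
            exact fun hc => hpre hc.1
          rw [if_neg hnmem]
          simp only
          have hded : PySem.List.dedup (pre ++ [k]) = PySem.List.dedup pre ++ [k] := by
            rw [pv_dedup_append_singleton, if_neg hpre]
          have hfilt : (PySem.List.dedup (pre ++ [k])).filter (fun k => decide (2 ≤ keys.count k))
              = (PySem.List.dedup pre).filter (fun k => decide (2 ≤ keys.count k)) ++ [k] := by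
            rw [hded, List.filter_append]
            simp [hP]
          have hpref : (PySem.List.dedup (pre ++ [k])).filter (fun k => decide (2 ≤ keys.count k))
              <+: pvKept keys := by
            unfold pvKept
            have h2 : keys = (pre ++ [k]) ++ suf := by rw [h, List.append_assoc]; rfl
            rw [h2]
            exact pv_dedup_filter_prefix _ _ _
          have hidx : (pvKept keys).idxOf k
              = ((PySem.List.dedup pre).filter (fun k => decide (2 ≤ keys.count k))).length := by
            obtain ⟨t, ht⟩ := hpref
            rw [hfilt, List.append_assoc, List.cons_append, List.nil_append] at ht
            rw [← ht, pv_idxOf_append]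
            exact hnmem
          rw [Prod.mk.injEq]
          refine ⟨?_, ?_⟩
          · rw [List.map_append, List.map_cons, List.map_nil]
            congr 2
            unfold pvLabel
            rw [if_pos hP, hidx, List.length_map]
          · rw [PySem.Dict.insert]
            have hcon : ((PySem.Dict.mk (((PySem.List.dedup pre).filter
                (fun k => decide (2 ≤ keys.count k))).map
                  (fun k => (k, ((pvKept keys).idxOf k : Int)))) : PySem.Dict (String × String) Int).contains k)
                = false := by
              rw [PySem.Dict.contains]
              simp only
              rw [List.any_eq_false]
              rintro ⟨k', v⟩ hkv
              obtain ⟨k'', hk'', heq⟩ := List.mem_map.mp hkv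
              cases heq
              simp only [beq_iff_eq]
              exact fun hc => hnmem (hc ▸ hk'')
            rw [hcon]
            simp only [Bool.false_eq_true, if_false]
            congr 1
            rw [hfilt, List.map_append, List.map_cons, List.map_nil]
            congr 2
            rw [hidx, List.length_map]
      · rw [if_neg hP]
        have hfilt : (PySem.List.dedup (pre ++ [k])).filter (fun k => decide (2 ≤ keys.count k))
            = (PySem.List.dedup pre).filter (fun k => decide (2 ≤ keys.count k)) := by
          rw [pv_dedup_append_singleton]
          split_ifs
          · rfl
          · rw [List.filter_append]
            simp [hP]
        rw [Prod.mk.injEq]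
        refine ⟨?_, ?_⟩
        · rw [List.map_append, List.map_cons, List.map_nil]
          congr 2
          unfold pvLabel
          rw [if_neg hP]
        · rw [hfilt]
    rw [hstep]
    exact ih (pre ++ [k]) (by rw [h, List.append_assoc]; rfl)

lemma pv_B_eq_ref (messages : List String) :
    cluster_fallback_alt messages
      = (messages.map pvKey).map (pvLabel (messages.map pvKey)) := by
  unfold cluster_fallback_alt
  dsimp only
  have hstep :
      (fun (st : List Int × PySem.Dict (String × String) Int) k =>
        if 2 ≤ ((messages.map pvKey).foldl (fun d k => d.modify k 0 (fun c => c + 1))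
            (PySem.Dict.mk []) : PySem.Dict (String × String) Int).getD k 0 then
          match st.2.get? k with
          | some v => (st.1 ++ [v], st.2)
          | none => (st.1 ++ [(st.2.items.length : Int)], st.2.insert k (st.2.items.length : Int))
        else (st.1 ++ [(-1 : Int)], st.2))
      = (fun (st : List Int × PySem.Dict (String × String) Int) k =>
        if 2 ≤ (messages.map pvKey).count k then
          match st.2.get? k with
          | some v => (st.1 ++ [v], st.2)
          | none => (st.1 ++ [(st.2.items.length : Int)], st.2.insert k (st.2.items.length : Int))
        else (st.1 ++ [(-1 : Int)], st.2)) := by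
    funext st k
    rw [pv_counts_getD]
    by_cases h : 2 ≤ (messages.map pvKey).count k
    · rw [if_pos (by exact_mod_cast h), if_pos h]
    · rw [if_neg (by exact_mod_cast h), if_neg h]
  rw [hstep]
  have hinit : (([] : List Int), (PySem.Dict.mk [] : PySem.Dict (String × String) Int))
      = (([] : List (String × String)).map (pvLabel (messages.map pvKey)),
         PySem.Dict.mk (((PySem.List.dedup ([] : List (String × String))).filter
           (fun k => decide (2 ≤ (messages.map pvKey).count k))).map
             (fun k => (k, ((pvKept (messages.map pvKey)).idxOf k : Int))))) := rfl
  rw [hinit, pv_B_loop (messages.map pvKey) (messages.map pvKey) [] rfl]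

-- ===== VERDICT (by name: the statement is the Claim_ definition above) =====
theorem cluster_fallback_spec : Claim_equal_cluster_fallback := by
  intro messages _
  unfold Spec_cluster_fallback
  rw [pv_A_eq_ref, pv_B_eq_ref]
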